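-- pv_equiv track=rewrite | github.com/joshualeiper/imperial_irp | master_database/__main__.py | reorder_file_list
-- ===== SOURCE A (Python) =====
-- def reorder_file_list(file_list, rank_dict):
--
--     # Extract filenames from the paths
--     filenames = [path.split('/')[-1] for path in file_list]
--
--     # Separate the files based on their presence in the ranking dictionary
--     ranked_files = [file for file in filenames if f'#{file}' in rank_dict]
--     unranked_files = [file for file in filenames if f'#{file}' not in rank_dict]
--
--     # Sort the ranked files according to the ranking dictionary
--     ranked_files.sort(key=lambda x: rank_dict[f'#{x}'])
--
--     # Combine the sorted ranked files with the remaining unranked files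
--     sorted_filenames = ranked_files + unranked_files
--
--     # Recreate the file paths in the new order
--     sorted_file_paths = [f'#{filename}' for filename in sorted_filenames]
--
--     return sorted_file_paths
-- ===== SOURCE B (Python) =====
-- def reorder_file_list(file_list, rank_dict):
--     # Extract filenames from the paths
--     filenames = [path.split('/')[-1] for path in file_list]
--
--     # One stable sort over all filenames: ranked files (tag 0) ordered by rank
--     # come first, unranked files (tag 1) keep their original order.
--     def key(f):
--         k = f'#{f}'
--         return (0, rank_dict[k]) if k in rank_dict else (1, 0)
--
--     return [f'#{f}' for f in sorted(filenames, key=key)]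
-- ===== Notes on version B (the rewrite author's own statement) =====
-- stated objective: simpler
-- what changed: Replaces A's partition-into-ranked/unranked-then-sort-then-concatenate with a single stable sort of all filenames under a tagged tuple key (0, rank) / (1, 0), relying on sort stability to keep unranked files behind in original order.
import Mathlib
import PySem

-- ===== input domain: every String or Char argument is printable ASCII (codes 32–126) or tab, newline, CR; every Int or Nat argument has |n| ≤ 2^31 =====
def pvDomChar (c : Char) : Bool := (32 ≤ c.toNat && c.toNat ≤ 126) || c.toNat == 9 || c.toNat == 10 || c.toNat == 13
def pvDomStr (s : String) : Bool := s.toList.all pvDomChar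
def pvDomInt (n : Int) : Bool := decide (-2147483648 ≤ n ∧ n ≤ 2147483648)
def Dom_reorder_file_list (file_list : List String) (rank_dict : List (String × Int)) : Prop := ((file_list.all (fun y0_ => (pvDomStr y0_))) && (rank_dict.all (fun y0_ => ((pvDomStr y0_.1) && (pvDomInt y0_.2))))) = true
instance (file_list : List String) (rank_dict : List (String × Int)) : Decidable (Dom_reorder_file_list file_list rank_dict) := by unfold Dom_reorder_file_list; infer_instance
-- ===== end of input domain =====

-- B replaces A's partition/sort/concatenate with one stable sort under a tagged tuple key (objective: simpler).

-- dict lookup on the association list: first match (exact for Python dict semantics)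
def pvLookup? (d : List (String × Int)) (k : String) : Option Int :=
  (d.find? (fun p => p.1 == k)).map (·.2)

-- path.split('/')[-1]; str.split with a non-empty separator never fails and never returns
-- an empty list, so neither .getD default is ever used
def pvFname (path : String) : String :=
  (PySem.List.pyGet? ((PySem.Str.split? path "/").getD []) (-1)).getD ""

-- ===== PORT A =====
def reorder_file_list (file_list : List String) (rank_dict : List (String × Int)) : List String :=
  let filenames := file_list.map (fun path => pvFname path)
  let ranked_files := filenames.filter (fun f => (pvLookup? rank_dict ("#" ++ f)).isSome)
  let unranked_files := filenames.filter (fun f => !(pvLookup? rank_dict ("#" ++ f)).isSome)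
  -- rank_dict[f'#{x}']: the key is present for every ranked file, so .getD 0 is exact
  let ranked_sorted := PySem.List.sorted ranked_files (fun x => (pvLookup? rank_dict ("#" ++ x)).getD 0)
  let sorted_filenames := ranked_sorted ++ unranked_files
  sorted_filenames.map (fun filename => "#" ++ filename)

-- ===== PORT B =====
def reorder_file_list_alt (file_list : List String) (rank_dict : List (String × Int)) : List String :=
  let filenames := file_list.map (fun path => pvFname path)
  (PySem.List.sorted2 filenames
      (fun f => if (pvLookup? rank_dict ("#" ++ f)).isSome then (0 : Int) else 1)
      (fun f => (pvLookup? rank_dict ("#" ++ f)).getD 0)).map (fun f => "#" ++ f)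

-- ===== PRECONDITION & SPEC =====
def Spec_reorder_file_list (file_list : List String) (rank_dict : List (String × Int)) (out : List String) : Prop := out = reorder_file_list_alt file_list rank_dict
instance (file_list : List String) (rank_dict : List (String × Int)) (out : List String) : Decidable (Spec_reorder_file_list file_list rank_dict out) := by unfold Spec_reorder_file_list; infer_instance

-- ===== CLAIM (what is proved, stated in full; the proofs are below) =====
def Claim_equal_reorder_file_list : Prop := ∀ (file_list : List String) (rank_dict : List (String × Int)), Dom_reorder_file_list file_list rank_dict → Spec_reorder_file_list file_list rank_dict (reorder_file_list file_list rank_dict)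

-- ===== LEMMAS AND PROOFS =====

-- inserting x into S ++ U when the comparison agrees with b' on S and accepts all of U
lemma insertBy_append_congr {α : Type} (b b' : α → α → Bool) (x : α) (S U : List α)
    (hS : ∀ s ∈ S, b x s = b' x s) (hU : ∀ u ∈ U, b x u = true) :
    PySem.List.insertBy b x (S ++ U) = PySem.List.insertBy b' x S ++ U := by
  induction S with
  | nil =>
    cases U with
    | nil => simp [PySem.List.insertBy]
    | cons u us => simp [PySem.List.insertBy, hU u (by simp)]
  | cons s S' ih =>
    have hs := hS s (by simp)
    by_cases h : b x s = true
    · simp [PySem.List.insertBy, h, hs ▸ h]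
    · have h' : b' x s = false := by rw [← hs]; simpa using h
      simp [PySem.List.insertBy, h, h',
        ih (fun t ht => hS t (by simp [ht]))]

-- the single tagged-key stable sort equals sort-the-ranked ++ the-unranked
lemma sorted2_eq_partition {α : Type} (p : α → Bool) (r : α → Int)
    (h0 : ∀ x, p x = false → r x = 0) (fns : List α) :
    PySem.List.sorted2 fns (fun f => if p f then (0 : Int) else 1) r
      = PySem.List.sorted (fns.filter p) r ++ fns.filter (fun f => !p f) := by
  induction fns using List.reverseRecOn with
  | nil => simp [PySem.List.sorted2, PySem.List.sorted]
  | append_singleton fns x ih =>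
    have hfold : ∀ (l : List α),
        PySem.List.sorted2 l (fun f => if p f then (0 : Int) else 1) r
          = List.foldl (fun acc y => PySem.List.insertBy
              (fun a b => decide ((if p a then (0:Int) else 1) < (if p b then (0:Int) else 1)) ||
                (!decide ((if p b then (0:Int) else 1) < (if p a then (0:Int) else 1)) &&
                  decide (r a < r b))) y acc) [] l := by
      intro l; rfl
    rw [hfold, List.foldl_append, ← hfold, ih]
    simp only [List.foldl]
    by_cases hx : p x = true
    · -- x is ranked: it is inserted within the sorted ranked block
      rw [show List.filter p (fns ++ [x]) = List.filter p fns ++ [x] by simp [hx],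
        show List.filter (fun f => !p f) (fns ++ [x]) = List.filter (fun f => !p f) fns by
          simp [hx],
        PySem.List.sorted_eq_foldl_insertBy (List.filter p fns ++ [x]) r, List.foldl_append,
        ← PySem.List.sorted_eq_foldl_insertBy]
      simp only [List.foldl]
      apply insertBy_append_congr
      · intro s hs
        have : p s = true := by
          have hmem : s ∈ (fns.filter p) := (PySem.List.mem_sorted _ _ _ _).1 hs
          exact (List.mem_filter.1 hmem).2
        simp [hx, this]
      · intro u hu
        have : p u = false := by
          have := (List.mem_filter.1 hu).2
          simpa using this
        simp [hx, this]
    · -- x is unranked: it goes to the very end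
      have hx' : p x = false := by simpa using hx
      rw [show List.filter p (fns ++ [x]) = List.filter p fns by simp [hx'],
        show List.filter (fun f => !p f) (fns ++ [x]) = List.filter (fun f => !p f) fns ++ [x] by
          simp [hx'],
        PySem.List.insertBy_of_forall_not_before, List.append_assoc]
      intro y hy
      rcases List.mem_append.1 hy with hyS | hyU
      · have : p y = true := by
          have hmem : y ∈ (fns.filter p) := (PySem.List.mem_sorted _ _ _ _).1 hyS
          exact (List.mem_filter.1 hmem).2
        simp [hx', this]
      · have hpy : p y = false := by
          have := (List.mem_filter.1 hyU).2
          simpa using this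
        simp [hx', hpy, h0 x hx', h0 y hpy]

-- ===== VERDICT (by name: the statement is the Claim_ definition above) =====
theorem reorder_file_list_spec : Claim_equal_reorder_file_list := by
  intro file_list rank_dict _
  unfold Spec_reorder_file_list
  have h := sorted2_eq_partition
    (fun f => (pvLookup? rank_dict ("#" ++ f)).isSome)
    (fun f => (pvLookup? rank_dict ("#" ++ f)).getD 0)
    (by intro x hx
        simp only at hx
        cases hl : pvLookup? rank_dict ("#" ++ x) with
        | none => simp [hl]
        | some v => rw [hl] at hx; simp at hx)
    (file_list.map (fun path => pvFname path))
  simp only [reorder_file_list, reorder_file_list_alt, h]
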